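-- pv_equiv track=rewrite | github.com/urbao/stockoala | data_combiner.py | stock_period_close
-- ===== SOURCE A (Python) =====
-- def stock_period_close(period_data_list, stockid):
--     for day in reversed(range(len(period_data_list))): # since close price is last day, so use reversed-loop iterarion
--         for idx in range(len(period_data_list[day])):
--             if str(period_data_list[day][idx][0])==str(stockid): # matched id case
--                 # check if the data is valid, if NOT, break loop, and goto next day loop
--                 if str(period_data_list[day][idx][4])=="--" or str(period_data_list[day][idx][4])=="----":
--                     break
--                 else:
--                     return str(period_data_list[day][idx][4])
--     return "NaN" # no valid data,so return a string
-- ===== SOURCE B (Python) =====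
-- def stock_period_close(period_data_list, stockid):
--     sid = str(stockid)
--     result = "NaN"
--     for day in period_data_list:
--         entry = next((e for e in day if str(e[0]) == sid), None)
--         if entry is not None:
--             close = str(entry[4])
--             if close != "--" and close != "----":
--                 result = close
--     return result
-- ===== Notes on version B (the rewrite author's own statement) =====
-- stated objective: simpler
-- what changed: Replaced the reversed-index nested loops with early return/break by a single forward pass that finds each day's first matching entry with next() and keeps overwriting an accumulator, so the last valid day wins; no index arithmetic and no early exit.
-- outside the precondition, e.g. on stock_period_close([[[]], [['5', 'a', 'b', 'c', '9']]], '5'): A returns '9', B raises IndexError; on stock_period_close([[['5', 'a', 'b']], [['5', 'a', 'b', 'c', '9']]], '5'): A returns '9', B raises IndexError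
import Mathlib
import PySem

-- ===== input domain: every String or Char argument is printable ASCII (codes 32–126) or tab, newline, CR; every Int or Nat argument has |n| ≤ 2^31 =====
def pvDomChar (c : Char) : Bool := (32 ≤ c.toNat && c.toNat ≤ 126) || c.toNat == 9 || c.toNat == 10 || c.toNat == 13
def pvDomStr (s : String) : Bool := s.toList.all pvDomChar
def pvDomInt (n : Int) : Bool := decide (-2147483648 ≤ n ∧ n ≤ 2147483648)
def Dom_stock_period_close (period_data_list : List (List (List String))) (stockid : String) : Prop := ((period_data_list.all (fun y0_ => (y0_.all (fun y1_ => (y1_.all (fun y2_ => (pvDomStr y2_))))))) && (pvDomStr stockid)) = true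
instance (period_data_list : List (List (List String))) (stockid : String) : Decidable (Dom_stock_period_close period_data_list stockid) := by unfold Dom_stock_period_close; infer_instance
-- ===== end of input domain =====

-- B replaces A's reversed-index nested loops with a single forward fold that overwrites an
-- accumulator with each day's first-match valid close, so the last valid day wins (objective: simpler).


-- ===== PORT A =====
-- inner loop of A over one day's entries: some v = 'return v', none = loop fell through or 'break'.
-- Indexing e[0] / e[4] is valid under Pre_; List.getD is exact there.
def pvAday (stockid : String) : List (List String) → Option String
  | [] => none
  | e :: rest =>
    if e.getD 0 "" == stockid then
      if e.getD 4 "" == "--" || e.getD 4 "" == "----" then none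
      else some (e.getD 4 "")
    else pvAday stockid rest

-- outer loop of A, already running over the reversed day list
def pvAgo (stockid : String) : List (List (List String)) → String
  | [] => "NaN"
  | d :: rest =>
    match pvAday stockid d with
    | some v => v
    | none => pvAgo stockid rest

def stock_period_close (period_data_list : List (List (List String))) (stockid : String) : String :=
  pvAgo stockid period_data_list.reverse

-- ===== PORT B =====
-- forward fold; find? is next() over the generator, accumulator keeps the last valid close
def stock_period_close_alt (period_data_list : List (List (List String))) (stockid : String) : String :=
  period_data_list.foldl
    (fun result day =>
      match day.find? (fun e => e.getD 0 "" == stockid) with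
      | some e =>
        let close := e.getD 4 ""
        if close == "--" || close == "----" then result else close
      | none => result)
    "NaN"

-- ===== PRECONDITION & SPEC =====
-- Pre_ excludes rows containing an empty entry, or an entry whose id matches stockid but has
-- fewer than 5 fields: there A or B raises IndexError (A may still return when such a row lies
-- in a day its reversed early-return scan never reaches; B then raises).
def Pre_stock_period_close (period_data_list : List (List (List String))) (stockid : String) : Prop :=
  ∀ d ∈ period_data_list, ∀ e ∈ d, e ≠ [] ∧ (e.getD 0 "" = stockid → 5 ≤ e.length)
instance (period_data_list : List (List (List String))) (stockid : String) : Decidable (Pre_stock_period_close period_data_list stockid) := by unfold Pre_stock_period_close; infer_instance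

def pvWitness_stock_period_close : List (List (List String)) × String :=
  ([[["5", "a", "b", "c", "--"], ["7", "a", "b"]], [["5", "a", "b", "c", "9"]]], "5")

def Spec_stock_period_close (period_data_list : List (List (List String))) (stockid : String) (out : String) : Prop := out = stock_period_close_alt period_data_list stockid
instance (period_data_list : List (List (List String))) (stockid : String) (out : String) : Decidable (Spec_stock_period_close period_data_list stockid out) := by unfold Spec_stock_period_close; infer_instance

-- ===== CLAIM (what is proved, stated in full; the proofs are below) =====
def Claim_equal_stock_period_close : Prop := ∀ (period_data_list : List (List (List String))) (stockid : String), Dom_stock_period_close period_data_list stockid → Pre_stock_period_close period_data_list stockid → Spec_stock_period_close period_data_list stockid (stock_period_close period_data_list stockid)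

-- ===== LEMMAS AND PROOFS =====

-- A's inner day scan equals B's find?-then-validate step, as an Option
theorem pvAday_eq_find (stockid : String) (d : List (List String)) :
    pvAday stockid d =
      (d.find? (fun e => e.getD 0 "" == stockid)).bind
        (fun e => if e.getD 4 "" == "--" || e.getD 4 "" == "----" then none else some (e.getD 4 "")) := by
  induction d with
  | nil => rfl
  | cons e rest ih =>
    simp only [pvAday, List.find?_cons, List.getD]
    by_cases h : e[0]?.getD "" = stockid
    · simp [h]
    · rw [show (e[0]?.getD "" == stockid) = false from beq_eq_false_iff_ne.mpr h]
      simp only [Bool.false_eq_true, if_false]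
      rw [ih]
      simp [List.getD]

-- A's outer loop over a list m is the first some of pvAday along m, defaulted to "NaN"
theorem pvAgo_eq_findSome (stockid : String) (m : List (List (List String))) :
    pvAgo stockid m = (m.findSome? (pvAday stockid)).getD "NaN" := by
  induction m with
  | nil => rfl
  | cons d rest ih =>
    simp only [pvAgo, List.findSome?_cons]
    cases pvAday stockid d <;> simp [ih]

-- B's fold with any initial accumulator is the first some of pvAday along the reversed list
theorem foldB_eq (stockid : String) (l : List (List (List String))) : ∀ (a : String),
    l.foldl
      (fun result day =>
        match day.find? (fun e => e.getD 0 "" == stockid) with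
        | some e =>
          let close := e.getD 4 ""
          if close == "--" || close == "----" then result else close
        | none => result)
      a = (l.reverse.findSome? (pvAday stockid)).getD a := by
  induction l with
  | nil => intro a; rfl
  | cons d rest ih =>
    intro a
    have hd : List.findSome? (pvAday stockid) [d] = pvAday stockid d := by
      simp only [List.findSome?_cons, List.findSome?_nil]
      cases pvAday stockid d <;> rfl
    simp only [List.foldl_cons, List.reverse_cons, List.findSome?_append, ih, hd]
    rw [pvAday_eq_find]
    cases h : rest.reverse.findSome? (pvAday stockid) with
    | some v => simp [Option.or]
    | none =>
      simp only [Option.none_or]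
      cases hf : d.find? (fun e => e.getD 0 "" == stockid) with
      | none => simp
      | some e =>
        by_cases hv : (e[4]?.getD "" = "--" ∨ e[4]?.getD "" = "----") <;>
          simp [List.getD, hv]

-- ===== VERDICT (by name: the statement is the Claim_ definition above) =====
theorem stock_period_close_spec : Claim_equal_stock_period_close := by
  intro pdl sid _ _
  unfold Spec_stock_period_close stock_period_close stock_period_close_alt
  rw [pvAgo_eq_findSome, foldB_eq]
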